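-- pv_equiv track=rewrite | github.com/zach-blumenfeld/otel-to-neo4j | normalize.py | detect_convention
-- ===== SOURCE A (Python) =====
-- from typing import Any, Optional
--
-- def detect_convention(attrs: dict[str, Any]) -> str:
--     """Return 'openinference', 'otel_genai', 'vercel', 'mlflow', 'traceloop',
--     or 'unknown' based on which attribute prefix dominates the span."""
--     if "openinference.span.kind" in attrs:
--         return "openinference"
--     if any(k.startswith("gen_ai.") for k in attrs):
--         return "otel_genai"
--     if any(k.startswith("ai.") for k in attrs):
--         return "vercel"
--     if any(k.startswith("mlflow.") for k in attrs):
--         return "mlflow"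
--     if any(k.startswith("traceloop.") for k in attrs):
--         return "traceloop"
--     # OpenInference also commonly emits llm.*/tool.*/retrieval.* without
--     # explicit span.kind set — sniff for those.
--     if any(k.startswith(("llm.", "tool.", "retrieval.", "embedding."))
--            for k in attrs):
--         return "openinference"
--     return "unknown"
-- ===== SOURCE B (Python) =====
-- def detect_convention(attrs: dict[str, "Any"]) -> str:
--     """Single pass: rank each key by convention priority, keep the minimum."""
--     best = 6
--     for k in attrs:
--         if k == "openinference.span.kind":
--             r = 0
--         elif k.startswith("gen_ai."):
--             r = 1
--         elif k.startswith("ai."):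
--             r = 2
--         elif k.startswith("mlflow."):
--             r = 3
--         elif k.startswith("traceloop."):
--             r = 4
--         elif k.startswith(("llm.", "tool.", "retrieval.", "embedding.")):
--             r = 5
--         else:
--             r = 6
--         if r < best:
--             best = r
--     return ["openinference", "otel_genai", "vercel", "mlflow",
--             "traceloop", "openinference", "unknown"][best]
-- ===== Notes on version B (the rewrite author's own statement) =====
-- stated objective: alternative
-- what changed: Replaces A's six separate passes over the keys (one membership test plus five any() scans) by a single loop that ranks each key once and tracks the minimum rank, mapped to a name by a table at the end.
import Mathlib
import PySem

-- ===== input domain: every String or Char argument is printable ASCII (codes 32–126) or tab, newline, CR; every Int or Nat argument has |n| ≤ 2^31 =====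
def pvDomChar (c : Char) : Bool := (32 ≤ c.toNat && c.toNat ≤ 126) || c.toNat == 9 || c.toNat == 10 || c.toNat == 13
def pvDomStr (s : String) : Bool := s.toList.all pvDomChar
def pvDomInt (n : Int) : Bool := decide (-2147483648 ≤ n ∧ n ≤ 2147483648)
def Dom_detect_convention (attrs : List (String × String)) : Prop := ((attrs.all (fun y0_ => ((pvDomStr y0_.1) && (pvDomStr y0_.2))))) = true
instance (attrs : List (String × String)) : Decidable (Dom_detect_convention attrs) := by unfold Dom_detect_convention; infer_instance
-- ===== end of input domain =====

-- B replaces A's six separate scans over the keys by one loop tracking the minimum priority rank; alternative decomposition, same cost class.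

-- ===== PORT A =====
def detect_convention (attrs : List (String × String)) : String :=
  if attrs.any (fun kv => kv.1 == "openinference.span.kind") then "openinference"
  else if attrs.any (fun kv => PySem.Str.startswith kv.1 "gen_ai.") then "otel_genai"
  else if attrs.any (fun kv => PySem.Str.startswith kv.1 "ai.") then "vercel"
  else if attrs.any (fun kv => PySem.Str.startswith kv.1 "mlflow.") then "mlflow"
  else if attrs.any (fun kv => PySem.Str.startswith kv.1 "traceloop.") then "traceloop"
  else if attrs.any (fun kv => PySem.Str.startswith kv.1 "llm." || PySem.Str.startswith kv.1 "tool." ||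
                               PySem.Str.startswith kv.1 "retrieval." || PySem.Str.startswith kv.1 "embedding.") then "openinference"
  else "unknown"

-- ===== PORT B =====
-- rank of one key (the if/elif chain inside Source B's loop)
def pvRank (k : String) : Nat :=
  if k == "openinference.span.kind" then 0
  else if PySem.Str.startswith k "gen_ai." then 1
  else if PySem.Str.startswith k "ai." then 2
  else if PySem.Str.startswith k "mlflow." then 3
  else if PySem.Str.startswith k "traceloop." then 4
  else if PySem.Str.startswith k "llm." || PySem.Str.startswith k "tool." ||
          PySem.Str.startswith k "retrieval." || PySem.Str.startswith k "embedding." then 5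
  else 6

def pvNames : List String :=
  ["openinference", "otel_genai", "vercel", "mlflow", "traceloop", "openinference", "unknown"]

def detect_convention_alt (attrs : List (String × String)) : String :=
  let best := attrs.foldl (fun b kv => let r := pvRank kv.1; if r < b then r else b) 6
  pvNames.getD best "unknown"

-- ===== PRECONDITION & SPEC =====
def Spec_detect_convention (attrs : List (String × String)) (out : String) : Prop := out = detect_convention_alt attrs
instance (attrs : List (String × String)) (out : String) : Decidable (Spec_detect_convention attrs out) := by unfold Spec_detect_convention; infer_instance

-- ===== CLAIM (what is proved, stated in full; the proofs are below) =====
def Claim_equal_detect_convention : Prop := ∀ (attrs : List (String × String)), Dom_detect_convention attrs → Spec_detect_convention attrs (detect_convention attrs)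

-- ===== LEMMAS AND PROOFS =====

theorem pvStep_eq_min : (fun (b : Nat) (kv : String × String) => let r := pvRank kv.1; if r < b then r else b)
    = (fun (b : Nat) (kv : String × String) => min b (pvRank kv.1)) := by
  funext b kv; simp only []; split_ifs <;> omega

theorem pvFoldl_min_le_iff (l : List (String × String)) (b c : Nat) :
    l.foldl (fun b kv => min b (pvRank kv.1)) b ≤ c ↔ b ≤ c ∨ ∃ kv ∈ l, pvRank kv.1 ≤ c := by
  induction l generalizing b with
  | nil => simp
  | cons x xs ih => simp [ih]; tauto

theorem pvLe_foldl_min (l : List (String × String)) (b c : Nat) (hb : c ≤ b)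
    (h : ∀ kv ∈ l, c ≤ pvRank kv.1) :
    c ≤ l.foldl (fun b kv => min b (pvRank kv.1)) b := by
  induction l generalizing b with
  | nil => simpa using hb
  | cons x xs ih =>
      simp only [List.foldl_cons]
      exact ih _ (le_min hb (h x (by simp))) (fun kv hkv => h kv (by simp [hkv]))

theorem pvBest_eq (l : List (String × String)) (r : Nat) (hr : r ≤ 6)
    (hlb : ∀ kv ∈ l, r ≤ pvRank kv.1) (hub : ∃ kv ∈ l, pvRank kv.1 ≤ r) :
    l.foldl (fun b kv => min b (pvRank kv.1)) 6 = r :=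
  le_antisymm ((pvFoldl_min_le_iff l 6 r).2 (Or.inr hub)) (pvLe_foldl_min l 6 r hr hlb)

theorem detect_convention_spec : Claim_equal_detect_convention := by
  intro attrs _
  unfold Spec_detect_convention detect_convention detect_convention_alt
  rw [pvStep_eq_min]
  by_cases h0 : attrs.any (fun kv => kv.1 == "openinference.span.kind") = true
  · rw [if_pos h0]
    obtain ⟨kv, hm, hc⟩ := List.any_eq_true.1 h0
    replace hc : (kv.1 == "openinference.span.kind") = true := hc
    rw [pvBest_eq attrs 0 (by omega)
        (fun kv _ => Nat.zero_le _)
        ⟨kv, hm, by simp only [pvRank, hc, Bool.false_eq_true, eq_self_iff_true, if_true, if_false]; omega⟩]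
    rfl
  · rw [Bool.not_eq_true] at h0
    rw [if_neg (by simp only [h0]; exact Bool.false_ne_true)]
    have H0 : ∀ kv ∈ attrs, (kv.1 == "openinference.span.kind") = false := by
      intro kv hkv
      exact Bool.eq_false_iff.mpr (List.any_eq_false.1 h0 kv hkv)
    by_cases h1 : attrs.any (fun kv => PySem.Str.startswith kv.1 "gen_ai.") = true
    · rw [if_pos h1]
      obtain ⟨kv, hm, hc⟩ := List.any_eq_true.1 h1
      replace hc : (PySem.Str.startswith kv.1 "gen_ai.") = true := hc
      rw [pvBest_eq attrs 1 (by omega)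
          (fun kv hkv => by simp only [pvRank, H0 kv hkv, Bool.false_eq_true, eq_self_iff_true, if_true, if_false]; split_ifs <;> omega)
          ⟨kv, hm, by simp only [pvRank, H0 kv hm, hc, Bool.false_eq_true, eq_self_iff_true, if_true, if_false]; omega⟩]
      rfl
    · rw [Bool.not_eq_true] at h1
      rw [if_neg (by simp only [h1]; exact Bool.false_ne_true)]
      have H1 : ∀ kv ∈ attrs, (PySem.Str.startswith kv.1 "gen_ai.") = false := by
        intro kv hkv
        exact Bool.eq_false_iff.mpr (List.any_eq_false.1 h1 kv hkv)
      by_cases h2 : attrs.any (fun kv => PySem.Str.startswith kv.1 "ai.") = true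
      · rw [if_pos h2]
        obtain ⟨kv, hm, hc⟩ := List.any_eq_true.1 h2
        replace hc : (PySem.Str.startswith kv.1 "ai.") = true := hc
        rw [pvBest_eq attrs 2 (by omega)
            (fun kv hkv => by simp only [pvRank, H0 kv hkv, H1 kv hkv, Bool.false_eq_true, eq_self_iff_true, if_true, if_false]; split_ifs <;> omega)
            ⟨kv, hm, by simp only [pvRank, H0 kv hm, H1 kv hm, hc, Bool.false_eq_true, eq_self_iff_true, if_true, if_false]; omega⟩]
        rfl
      · rw [Bool.not_eq_true] at h2
        rw [if_neg (by simp only [h2]; exact Bool.false_ne_true)]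
        have H2 : ∀ kv ∈ attrs, (PySem.Str.startswith kv.1 "ai.") = false := by
          intro kv hkv
          exact Bool.eq_false_iff.mpr (List.any_eq_false.1 h2 kv hkv)
        by_cases h3 : attrs.any (fun kv => PySem.Str.startswith kv.1 "mlflow.") = true
        · rw [if_pos h3]
          obtain ⟨kv, hm, hc⟩ := List.any_eq_true.1 h3
          replace hc : (PySem.Str.startswith kv.1 "mlflow.") = true := hc
          rw [pvBest_eq attrs 3 (by omega)
              (fun kv hkv => by simp only [pvRank, H0 kv hkv, H1 kv hkv, H2 kv hkv, Bool.false_eq_true, eq_self_iff_true, if_true, if_false]; split_ifs <;> omega)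
              ⟨kv, hm, by simp only [pvRank, H0 kv hm, H1 kv hm, H2 kv hm, hc, Bool.false_eq_true, eq_self_iff_true, if_true, if_false]; omega⟩]
          rfl
        · rw [Bool.not_eq_true] at h3
          rw [if_neg (by simp only [h3]; exact Bool.false_ne_true)]
          have H3 : ∀ kv ∈ attrs, (PySem.Str.startswith kv.1 "mlflow.") = false := by
            intro kv hkv
            exact Bool.eq_false_iff.mpr (List.any_eq_false.1 h3 kv hkv)
          by_cases h4 : attrs.any (fun kv => PySem.Str.startswith kv.1 "traceloop.") = true
          · rw [if_pos h4]
            obtain ⟨kv, hm, hc⟩ := List.any_eq_true.1 h4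
            replace hc : (PySem.Str.startswith kv.1 "traceloop.") = true := hc
            rw [pvBest_eq attrs 4 (by omega)
                (fun kv hkv => by simp only [pvRank, H0 kv hkv, H1 kv hkv, H2 kv hkv, H3 kv hkv, Bool.false_eq_true, eq_self_iff_true, if_true, if_false]; split_ifs <;> omega)
                ⟨kv, hm, by simp only [pvRank, H0 kv hm, H1 kv hm, H2 kv hm, H3 kv hm, hc, Bool.false_eq_true, eq_self_iff_true, if_true, if_false]; omega⟩]
            rfl
          · rw [Bool.not_eq_true] at h4
            rw [if_neg (by simp only [h4]; exact Bool.false_ne_true)]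
            have H4 : ∀ kv ∈ attrs, (PySem.Str.startswith kv.1 "traceloop.") = false := by
              intro kv hkv
              exact Bool.eq_false_iff.mpr (List.any_eq_false.1 h4 kv hkv)
            by_cases h5 : attrs.any (fun kv => PySem.Str.startswith kv.1 "llm." || PySem.Str.startswith kv.1 "tool." || PySem.Str.startswith kv.1 "retrieval." || PySem.Str.startswith kv.1 "embedding.") = true
            · rw [if_pos h5]
              obtain ⟨kv, hm, hc⟩ := List.any_eq_true.1 h5
              replace hc : (PySem.Str.startswith kv.1 "llm." || PySem.Str.startswith kv.1 "tool." || PySem.Str.startswith kv.1 "retrieval." || PySem.Str.startswith kv.1 "embedding.") = true := hc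
              rw [pvBest_eq attrs 5 (by omega)
                  (fun kv hkv => by simp only [pvRank, H0 kv hkv, H1 kv hkv, H2 kv hkv, H3 kv hkv, H4 kv hkv, Bool.false_eq_true, eq_self_iff_true, if_true, if_false]; split_ifs <;> omega)
                  ⟨kv, hm, by simp only [pvRank, H0 kv hm, H1 kv hm, H2 kv hm, H3 kv hm, H4 kv hm, hc, Bool.false_eq_true, eq_self_iff_true, if_true, if_false]; omega⟩]
              rfl
            · rw [Bool.not_eq_true] at h5
              rw [if_neg (by simp only [h5]; exact Bool.false_ne_true)]
              have H5 : ∀ kv ∈ attrs, (PySem.Str.startswith kv.1 "llm." || PySem.Str.startswith kv.1 "tool." || PySem.Str.startswith kv.1 "retrieval." || PySem.Str.startswith kv.1 "embedding.") = false := by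
                intro kv hkv
                exact Bool.eq_false_iff.mpr (List.any_eq_false.1 h5 kv hkv)
              have hall : ∀ kv ∈ attrs, pvRank kv.1 = 6 := by
                intro kv hkv
                simp only [pvRank, H0 kv hkv, H1 kv hkv, H2 kv hkv, H3 kv hkv, H4 kv hkv, H5 kv hkv, Bool.false_eq_true, eq_self_iff_true, if_true, if_false]
              have h6 : attrs.foldl (fun b kv => min b (pvRank kv.1)) 6 = 6 :=
                le_antisymm ((pvFoldl_min_le_iff attrs 6 6).2 (Or.inl le_rfl))
                  (pvLe_foldl_min attrs 6 6 le_rfl (fun kv hkv => by rw [hall kv hkv]))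
              rw [h6]
              rfl
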